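-- pv_equiv track=rewrite | github.com/arterm-sedov/cmw-platform-agent | tools/platform_entity_resolver.py | _resolve_solutions
-- ===== SOURCE A (Python) =====
-- from typing import TYPE_CHECKING, Any
--
-- def _resolve_solutions(
--     solution_ids: list[str],
--     template_cache: dict[str, dict[str, Any]],
-- ) -> dict[str, dict[str, Any]]:
--     """
--     Resolve solution IDs by matching against template cache.
--
--     Args:
--         solution_ids: List of solution IDs (e.g., ["sln.23"]).
--         template_cache: Cache from _resolve_templates.
--
--     Returns:
--         Dict mapping solution ID to resolved data.
--     """
--     solutions: dict[str, dict[str, Any]] = {}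
--     for sid in solution_ids:
--         for tpl in template_cache.values():
--             if tpl.get("solution") == sid:
--                 solutions[sid] = {
--                     "id": sid,
--                     "solutionName": tpl.get("solutionName", ""),
--                     "solution": sid,
--                 }
--                 break
--     return solutions
-- ===== SOURCE B (Python) =====
-- def _resolve_solutions(solution_ids, template_cache):
--     # Build a one-pass index: solution value -> solutionName of the FIRST template carrying it.
--     index = {}
--     for tpl in template_cache.values():
--         v = tpl.get("solution")
--         if v is not None and v not in index:
--             index[v] = tpl.get("solutionName", "")
--     solutions = {}
--     for sid in solution_ids:
--         name = index.get(sid)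
--         if name is not None:
--             solutions[sid] = {"id": sid, "solutionName": name, "solution": sid}
--     return solutions
-- ===== Notes on version B (the rewrite author's own statement) =====
-- stated objective: faster
-- what changed: Replaces A's nested loop (for each id, scan all template values for the first match) with a single pass that builds a first-wins index from 'solution' value to solutionName, then one lookup pass over solution_ids.
import Mathlib
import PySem

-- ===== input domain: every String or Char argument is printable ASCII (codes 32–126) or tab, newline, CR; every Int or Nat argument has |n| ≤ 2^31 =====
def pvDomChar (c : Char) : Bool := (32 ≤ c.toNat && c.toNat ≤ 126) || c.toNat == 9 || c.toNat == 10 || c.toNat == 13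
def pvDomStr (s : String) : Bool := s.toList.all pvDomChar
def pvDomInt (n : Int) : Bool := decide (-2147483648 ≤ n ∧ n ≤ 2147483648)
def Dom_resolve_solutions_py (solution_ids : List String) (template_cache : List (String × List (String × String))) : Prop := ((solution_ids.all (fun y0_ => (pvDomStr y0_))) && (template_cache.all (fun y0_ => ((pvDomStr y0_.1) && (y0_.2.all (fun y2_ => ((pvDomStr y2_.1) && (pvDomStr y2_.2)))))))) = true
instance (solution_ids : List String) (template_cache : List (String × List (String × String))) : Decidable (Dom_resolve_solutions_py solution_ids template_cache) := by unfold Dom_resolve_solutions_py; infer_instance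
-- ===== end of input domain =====

-- B replaces A's nested id-by-template scan with a one-pass index (solution value -> first template's
-- solutionName) followed by a single lookup pass over solution_ids: alternative data-structure decomposition.


-- ===== PORT A =====
-- inner 'for tpl in template_cache.values(): if tpl.get("solution") == sid: …; break'
def pvA_loop (sid : String) (sols : PySem.Dict String (List (String × String))) :
    List (List (String × String)) → PySem.Dict String (List (String × String))
  | [] => sols
  | tpl :: rest =>
    if (PySem.Dict.mk tpl).get? "solution" = some sid then
      sols.insert sid [("id", sid), ("solutionName", (PySem.Dict.mk tpl).getD "solutionName" ""), ("solution", sid)]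
    else pvA_loop sid sols rest

def resolve_solutions_py (solution_ids : List String) (template_cache : List (String × List (String × String))) : List (String × List (String × String)) :=
  (solution_ids.foldl (fun sols sid => pvA_loop sid sols (PySem.Dict.mk template_cache).values) PySem.Dict.empty).items

-- ===== PORT B =====
-- first pass: index 'solution' value -> solutionName of the first template carrying it
def pvB_index (template_cache : List (String × List (String × String))) : PySem.Dict String String :=
  (PySem.Dict.mk template_cache).values.foldl (fun idx tpl =>
    match (PySem.Dict.mk tpl).get? "solution" with
    | some v => if idx.contains v then idx else idx.insert v ((PySem.Dict.mk tpl).getD "solutionName" "")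
    | none => idx) PySem.Dict.empty

def resolve_solutions_py_alt (solution_ids : List String) (template_cache : List (String × List (String × String))) : List (String × List (String × String)) :=
  let idx := pvB_index template_cache
  (solution_ids.foldl (fun res sid =>
    match idx.get? sid with
    | some name => res.insert sid [("id", sid), ("solutionName", name), ("solution", sid)]
    | none => res) PySem.Dict.empty).items

-- ===== PRECONDITION & SPEC =====
def Spec_resolve_solutions_py (solution_ids : List String) (template_cache : List (String × List (String × String))) (out : List (String × List (String × String))) : Prop := out = resolve_solutions_py_alt solution_ids template_cache
instance (solution_ids : List String) (template_cache : List (String × List (String × String))) (out : List (String × List (String × String))) : Decidable (Spec_resolve_solutions_py solution_ids template_cache out) := by unfold Spec_resolve_solutions_py; infer_instance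

-- ===== CLAIM (what is proved, stated in full; the proofs are below) =====
def Claim_equal_resolve_solutions_py : Prop := ∀ (solution_ids : List String) (template_cache : List (String × List (String × String))), Dom_resolve_solutions_py solution_ids template_cache → Spec_resolve_solutions_py solution_ids template_cache (resolve_solutions_py solution_ids template_cache)

-- ===== LEMMAS AND PROOFS =====

-- proof-side: the solutionName of the first template whose 'solution' is sid
def pvFindName (sid : String) : List (List (String × String)) → Option String
  | [] => none
  | tpl :: rest =>
    if (PySem.Dict.mk tpl).get? "solution" = some sid then
      some ((PySem.Dict.mk tpl).getD "solutionName" "")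
    else pvFindName sid rest

theorem pvA_loop_eq (sid : String) (sols : PySem.Dict String (List (String × String)))
    (tpls : List (List (String × String))) :
    pvA_loop sid sols tpls =
      match pvFindName sid tpls with
      | some name => sols.insert sid [("id", sid), ("solutionName", name), ("solution", sid)]
      | none => sols := by
  induction tpls with
  | nil => rfl
  | cons tpl rest ih =>
    simp only [pvA_loop, pvFindName]
    split_ifs with h <;> simp [ih]

theorem pvB_index_get? (sid : String) (tpls : List (List (String × String)))
    (idx : PySem.Dict String String) :
    (tpls.foldl (fun idx tpl =>
      match (PySem.Dict.mk tpl).get? "solution" with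
      | some v => if idx.contains v then idx else idx.insert v ((PySem.Dict.mk tpl).getD "solutionName" "")
      | none => idx) idx).get? sid = (idx.get? sid).or (pvFindName sid tpls) := by
  induction tpls generalizing idx with
  | nil => cases h : idx.get? sid <;> simp [pvFindName, h]
  | cons tpl rest ih =>
    simp only [List.foldl_cons, pvFindName]
    cases hv : (PySem.Dict.mk tpl).get? "solution" with
    | none => simp [ih]
    | some v =>
      simp only []
      by_cases hvs : v = sid
      · subst hvs
        cases h : idx.get? v with
        | some n =>
          have hc : idx.contains v = true := by
            rw [PySem.Dict.contains_eq_isSome_get?, h]; rfl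
          rw [if_pos hc, ih, h]; simp
        | none =>
          have hc : idx.contains v = false := by
            rw [PySem.Dict.contains_eq_isSome_get?, h]; rfl
          rw [if_neg (by simp [hc]), ih, PySem.Dict.get?_insert_self]
          simp
      · have hsv : sid ≠ v := fun h => hvs h.symm
        split
        · rw [ih]; simp [hvs]
        · rw [ih, PySem.Dict.get?_insert_of_ne _ _ hsv]; simp [hvs]

theorem step_eq (template_cache : List (String × List (String × String)))
    (sols : PySem.Dict String (List (String × String))) (sid : String) :
    pvA_loop sid sols (PySem.Dict.mk template_cache).values =
      (match (pvB_index template_cache).get? sid with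
       | some name => sols.insert sid [("id", sid), ("solutionName", name), ("solution", sid)]
       | none => sols) := by
  rw [pvA_loop_eq]
  have h := pvB_index_get? sid (PySem.Dict.mk template_cache).values PySem.Dict.empty
  rw [PySem.Dict.get?_empty] at h
  simp only [Option.or] at h
  unfold pvB_index
  rw [h]

-- ===== VERDICT (by name: the statement is the Claim_ definition above) =====
theorem resolve_solutions_py_spec : Claim_equal_resolve_solutions_py := by
  intro solution_ids template_cache _
  unfold Spec_resolve_solutions_py
  have hstep : (fun (sols : PySem.Dict String (List (String × String))) (sid : String) =>
      pvA_loop sid sols (PySem.Dict.mk template_cache).values) =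
      (fun res sid =>
        match (pvB_index template_cache).get? sid with
        | some name => res.insert sid [("id", sid), ("solutionName", name), ("solution", sid)]
        | none => res) :=
    funext fun sols => funext fun sid => step_eq template_cache sols sid
  simp only [resolve_solutions_py, resolve_solutions_py_alt, hstep]
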